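-- pv_equiv track=rewrite | github.com/vgraeber/adventofcode | 2023/day2/part2.py | sortcubes
-- ===== SOURCE A (Python) =====
-- def sortcubes(cubes):
--   colors = ["red", "green", "blue"]
--   allcubedata = []
--   colorsonly = []
--   for i in cubes:
--     diced = i.split(' ')
--     allcubedata.append(diced)
--     colorsonly.append(diced[1])
--   colorindexes = []
--   for i in colors:
--     try:
--       colorindexes.append(colorsonly.index(i))
--     except ValueError:
--       colorindexes.append(-1)
--   for i in colors:
--     try:
--       colorsonly.pop(colorsonly.index(i))
--     except ValueError:
--       pass
--   newcubedata = []
--   for i in range(len(colorindexes)):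
--     if (colorindexes[i] == -1):
--       newcubedata.insert(i, 0)
--     else:
--       newcubedata.insert(i, int(allcubedata[colorindexes[i]][0]))
--   return newcubedata
-- ===== SOURCE B (Python) =====
-- def sortcubes(cubes):
--   def first(rest):
--     # returns the split parts of the FIRST entry of each color (head processed
--     # after the tail, so the head overrides: earliest occurrence wins)
--     if not rest:
--       return (None, None, None)
--     r, g, b = first(rest[1:])
--     parts = rest[0].split(' ')
--     c = parts[1]
--     if c == "red":
--       r = parts
--     elif c == "green":
--       g = parts
--     elif c == "blue":
--       b = parts
--     return (r, g, b)
--   r, g, b = first(cubes)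
--   return [0 if p is None else int(p[0]) for p in (r, g, b)]
-- ===== Notes on version B (the rewrite author's own statement) =====
-- stated objective: alternative
-- what changed: Replaces A's staged list passes (collect all colors, three list.index scans, a dead pop loop, insert-by-index assembly) with a structural recursion over the list building a fixed red/green/blue triple back-to-front, where the head overrides the tail so the first occurrence wins; no index search and no intermediate lists.
import Mathlib
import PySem

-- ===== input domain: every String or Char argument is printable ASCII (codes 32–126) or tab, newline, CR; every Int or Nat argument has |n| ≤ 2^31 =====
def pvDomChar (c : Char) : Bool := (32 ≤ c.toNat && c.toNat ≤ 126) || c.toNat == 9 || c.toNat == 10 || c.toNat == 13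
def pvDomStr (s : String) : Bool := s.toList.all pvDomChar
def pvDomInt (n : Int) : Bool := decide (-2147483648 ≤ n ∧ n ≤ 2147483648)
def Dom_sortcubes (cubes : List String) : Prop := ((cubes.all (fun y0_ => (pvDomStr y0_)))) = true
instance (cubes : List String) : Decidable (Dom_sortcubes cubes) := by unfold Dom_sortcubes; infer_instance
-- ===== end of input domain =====

-- B replaces A's staged list passes (collect colors, three index? scans, a dead pop loop,
-- insert-by-index) by one structural recursion building a red/green/blue triple back-to-front,
-- head overriding tail so the first occurrence wins; objective: alternative.

def colorNames : List String := ["red", "green", "blue"]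

-- s.split(' '): split? with a nonempty separator is always `some`; exact
def pySplitSp (s : String) : List String := (PySem.Str.split? s " ").getD []

-- ===== PORT A =====
-- the `.getD ""` / `.getD 0` defaults are reached only where Python raises (IndexError on diced[1],
-- ValueError in int()); exactly those inputs are excluded by Pre_ below.
def sortcubes (cubes : List String) : List Int :=
  -- for i in cubes: diced = i.split(' '); allcubedata.append(diced); colorsonly.append(diced[1])
  let st := cubes.foldl (fun (st : List (List String) × List String) i =>
      (st.1 ++ [pySplitSp i], st.2 ++ [(PySem.List.pyGet? (pySplitSp i) 1).getD ""])) ([], [])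
  let allcubedata := st.1
  let colorsonly := st.2
  -- for i in colors: try colorindexes.append(colorsonly.index(i)) except ValueError: append(-1)
  let colorindexes := colorNames.foldl (fun acc i =>
      match PySem.List.index? colorsonly i with
      | some j => acc ++ [(j : Int)]
      | none   => acc ++ [(-1 : Int)]) []
  -- for i in colors: try colorsonly.pop(colorsonly.index(i)) except ValueError: pass  (result unused by A)
  let _colorsonly' := colorNames.foldl (fun cs i =>
      match PySem.List.index? cs i with
      | some j => (((PySem.List.pop? cs (j : Int)).map Prod.snd).getD cs)
      | none   => cs) colorsonly
  -- for i in range(len(colorindexes)): newcubedata.insert(i, 0 or int(allcubedata[colorindexes[i]][0]))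
  (PySem.List.pyRange 0 (PySem.List.len colorindexes) 1).foldl (fun nc i =>
      if PySem.List.pyGetD colorindexes i 0 = -1 then
        PySem.List.insert nc i 0
      else
        PySem.List.insert nc i
          ((PySem.Int.ofStr?
             ((PySem.List.pyGet?
                (PySem.List.pyGetD allcubedata (PySem.List.pyGetD colorindexes i 0) []) 0).getD "")).getD 0)) []

-- ===== PORT B =====
-- B's inner recursion `first`: the split parts of the FIRST entry of each color
-- (tail computed first, head overrides, so the earliest occurrence wins)
def pvFirst (rest : List String) :
    Option (List String) × Option (List String) × Option (List String) :=
  match rest with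
  | [] => (none, none, none)
  | x :: xs =>
    let acc := pvFirst xs
    let parts := pySplitSp x
    let c := (PySem.List.pyGet? parts 1).getD ""
    if c = "red" then (some parts, acc.2.1, acc.2.2)
    else if c = "green" then (acc.1, some parts, acc.2.2)
    else if c = "blue" then (acc.1, acc.2.1, some parts)
    else acc

-- the final comprehension's body: 0 if p is None else int(p[0])
def pvOptVal (p : Option (List String)) : Int :=
  match p with
  | none => 0
  | some parts => (PySem.Int.ofStr? ((PySem.List.pyGet? parts 0).getD "")).getD 0

def sortcubes_alt (cubes : List String) : List Int :=
  let t := pvFirst cubes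
  [t.1, t.2.1, t.2.2].map pvOptVal

-- ===== PRECONDITION & SPEC =====
-- Pre_ excludes exactly the inputs where Python A raises: an entry whose split(' ') has fewer than
-- two fields (IndexError on diced[1]), or a first-occurrence red/green/blue entry whose count field
-- is not int()-parsable (ValueError).
def Pre_sortcubes (cubes : List String) : Prop :=
  (∀ s ∈ cubes, 2 ≤ (pySplitSp s).length) ∧
  (∀ c ∈ colorNames,
    ((cubes.find? (fun x =>
        ((PySem.List.pyGet? (pySplitSp x) 1).getD "") == c)).all
      (fun s =>
        (PySem.Int.ofStr? ((PySem.List.pyGet? (pySplitSp s) 0).getD "")).isSome)) = true)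
instance (cubes : List String) : Decidable (Pre_sortcubes cubes) := by unfold Pre_sortcubes; infer_instance

def pvWitness_sortcubes : List String := ["3 blue", "4 red", "2 green", "6 blue"]

def Spec_sortcubes (cubes : List String) (out : List Int) : Prop := out = sortcubes_alt cubes
instance (cubes : List String) (out : List Int) : Decidable (Spec_sortcubes cubes out) := by unfold Spec_sortcubes; infer_instance

-- ===== CLAIM (what is proved, stated in full; the proofs are below) =====
def Claim_equal_sortcubes : Prop := ∀ (cubes : List String), Dom_sortcubes cubes → Pre_sortcubes cubes → Spec_sortcubes cubes (sortcubes cubes)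

-- ===== LEMMAS AND PROOFS =====

-- the color field diced[1] of an entry (with A's in-port default)
def colF (s : String) : String := (PySem.List.pyGet? (pySplitSp s) 1).getD ""
-- the parsed count field of a parts list (with A's in-port default)
def intF (parts : List String) : Int :=
  (PySem.Int.ofStr? ((PySem.List.pyGet? parts 0).getD "")).getD 0
-- the value both programs produce for one color: the parsed count of the first entry of that color
def valF (cubes : List String) (c : String) : Int :=
  match cubes.find? (fun s => colF s == c) with
  | none => 0
  | some s => intF (pySplitSp s)
-- A's per-color index, as a function
def cidx (cubes : List String) (c : String) : Int :=
  match PySem.List.index? (cubes.map colF) c with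
  | some j => (j : Int)
  | none => -1

lemma index_char (cubes : List String) (c : String) :
    (match PySem.List.index? (cubes.map colF) c with
     | none => (0 : Int)
     | some j => intF ((cubes.map pySplitSp).getD j []))
    = valF cubes c := by
  induction cubes with
  | nil => simp [valF, PySem.List.index?]
  | cons x xs ih =>
    by_cases h : colF x = c
    · subst h
      rw [List.map_cons, PySem.List.index?_cons_self]
      simp [valF, List.find?]
    · rw [List.map_cons, PySem.List.index?_cons_of_ne _ h]
      have hfind : List.find? (fun s => colF s == c) (x :: xs)
          = List.find? (fun s => colF s == c) xs :=
        List.find?_cons_of_neg (by simpa using h)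
      cases hj : PySem.List.index? (xs.map colF) c with
      | none =>
        rw [hj] at ih
        simpa [valF, hfind] using ih
      | some j =>
        rw [hj] at ih
        simpa [valF, hfind, List.getD_cons_succ] using ih

lemma per_color (cubes : List String) (c : String) :
    (if cidx cubes c = -1 then (0 : Int)
     else (PySem.Int.ofStr?
        ((PySem.List.pyGet?
          (PySem.List.pyGetD (cubes.map pySplitSp) (cidx cubes c) []) 0).getD "")).getD 0)
    = valF cubes c := by
  have := index_char cubes c
  unfold cidx
  cases hj : PySem.List.index? (cubes.map colF) c with
  | none => rw [hj] at this; simpa using this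
  | some j =>
    rw [hj] at this
    have hne : ((j : Int)) ≠ -1 := by omega
    simpa [hne, intF] using this

lemma A_char (cubes : List String) :
    sortcubes cubes = [valF cubes "red", valF cubes "green", valF cubes "blue"] := by
  unfold sortcubes
  rw [PySem.List.foldl_prod_mk (f := fun acc i => acc ++ [pySplitSp i])
      (g := fun acc i => acc ++ [(PySem.List.pyGet? (pySplitSp i) 1).getD ""])]
  rw [PySem.List.foldl_append_singleton_eq_map, PySem.List.foldl_append_singleton_eq_map]
  have hstep : ∀ (acc : List Int) (i : String),
      (match PySem.List.index? (cubes.map (fun s => (PySem.List.pyGet? (pySplitSp s) 1).getD "")) i with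
       | some j => acc ++ [(j : Int)]
       | none => acc ++ [(-1 : Int)]) = acc ++ [cidx cubes i] := by
    intro acc i
    unfold cidx colF
    cases PySem.List.index? (cubes.map (fun s => (PySem.List.pyGet? (pySplitSp s) 1).getD "")) i <;> rfl
  simp only [colorNames, List.foldl, hstep, List.nil_append]
  simp only [List.cons_append, List.nil_append]
  rw [show PySem.List.len [cidx cubes "red", cidx cubes "green", cidx cubes "blue"]
      = (3 : Int) from by simp [PySem.List.len_eq]]
  rw [show PySem.List.pyRange 0 3 1 = [0, 1, 2] from by decide]
  have hins : ∀ (nc : List Int) (i : Int) (c : Prop) [Decidable c] (v : Int),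
      (if c then PySem.List.insert nc i 0 else PySem.List.insert nc i v)
        = PySem.List.insert nc i (if c then 0 else v) := by
    intro nc i c _ v; split <;> rfl
  simp only [List.foldl, hins]
  have p0 : ∀ (a b c : Int), PySem.List.pyGetD [a, b, c] 0 0 = a := fun _ _ _ => rfl
  have p1 : ∀ (a b c : Int), PySem.List.pyGetD [a, b, c] 1 0 = b := fun _ _ _ => rfl
  have p2 : ∀ (a b c : Int), PySem.List.pyGetD [a, b, c] 2 0 = c := fun _ _ _ => rfl
  simp only [p0, p1, p2]
  rw [per_color, per_color, per_color]
  rfl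

lemma first_char (cubes : List String) :
    pvFirst cubes =
      ((cubes.find? (fun s => colF s == "red")).map pySplitSp,
       (cubes.find? (fun s => colF s == "green")).map pySplitSp,
       (cubes.find? (fun s => colF s == "blue")).map pySplitSp) := by
  induction cubes with
  | nil => rfl
  | cons x xs ih =>
    show (let acc := pvFirst xs
          let parts := pySplitSp x
          let c := (PySem.List.pyGet? parts 1).getD ""
          if c = "red" then (some parts, acc.2.1, acc.2.2)
          else if c = "green" then (acc.1, some parts, acc.2.2)
          else if c = "blue" then (acc.1, acc.2.1, some parts)
          else acc) = _
    rw [ih]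
    by_cases hr : colF x = "red"
    · simp [colF] at hr
      simp [hr, colF]
    · by_cases hg : colF x = "green"
      · simp [colF] at hg
        simp [hg, colF]
      · by_cases hb : colF x = "blue"
        · simp [colF] at hb
          simp [hb, colF]
        · simp [colF] at hr hg hb
          simp [hr, hg, hb, colF]

lemma B_char (cubes : List String) :
    sortcubes_alt cubes = [valF cubes "red", valF cubes "green", valF cubes "blue"] := by
  unfold sortcubes_alt
  rw [first_char]
  have key : ∀ c, pvOptVal ((cubes.find? (fun s => colF s == c)).map pySplitSp)
      = valF cubes c := by
    intro c
    unfold valF pvOptVal intF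
    cases cubes.find? (fun s => colF s == c) <;> rfl
  simp only [List.map]
  rw [key, key, key]

-- ===== VERDICT (by name: the statement is the Claim_ definition above) =====
theorem sortcubes_spec : Claim_equal_sortcubes := by
  intro cubes _ _
  unfold Spec_sortcubes
  rw [A_char, B_char]
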